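-- pv_equiv track=rewrite | github.com/whoiswillma/nlp-experiments | train_luke_on_conll.py | get_entity_spans_to_label
-- ===== SOURCE A (Python) =====
-- def get_entity_spans_to_label(labels: list[int]):
--     entity_spans_to_label = {}
--
--     prev = 0
--     entity_label = None
--     entity_start = None
--
--     for idx, label in enumerate(labels + [0]):
--         if label != prev:
--             if prev != 0:
--                 entity_spans_to_label[(entity_start, idx)] = entity_label
--
--             entity_start = idx
--             entity_label = label
--
--         prev = label
--
--     return entity_spans_to_label
-- ===== SOURCE B (Python) =====
-- def get_entity_spans_to_label(labels: list[int]):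
--     # Two-pointer run scanner: find each maximal run [i, j) of equal labels,
--     # record it if the value is nonzero. No prev-state machine, no [0] sentinel.
--     res = {}
--     i, n = 0, len(labels)
--     while i < n:
--         v = labels[i]
--         j = i + 1
--         while j < n and labels[j] == v:
--             j += 1
--         if v != 0:
--             res[(i, j)] = v
--         i = j
--     return res
-- ===== Notes on version B (the rewrite author's own statement) =====
-- stated objective: alternative
-- what changed: Replaces the prev-state transition machine over the sentinel-extended label list (tracking prev/entity_start/entity_label) with a two-pointer maximal-run scanner that records each nonzero run directly.
import Mathlib
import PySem

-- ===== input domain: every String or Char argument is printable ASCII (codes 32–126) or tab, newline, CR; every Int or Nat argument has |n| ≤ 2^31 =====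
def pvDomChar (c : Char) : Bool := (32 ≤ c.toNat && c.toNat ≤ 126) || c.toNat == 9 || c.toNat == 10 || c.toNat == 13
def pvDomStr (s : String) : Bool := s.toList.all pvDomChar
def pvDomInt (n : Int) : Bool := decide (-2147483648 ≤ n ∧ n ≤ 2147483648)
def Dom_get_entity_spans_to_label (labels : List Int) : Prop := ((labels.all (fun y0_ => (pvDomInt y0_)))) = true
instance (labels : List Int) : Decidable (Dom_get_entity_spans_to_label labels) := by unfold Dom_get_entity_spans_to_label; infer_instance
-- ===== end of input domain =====

-- B replaces A's prev-state transition machine over the sentinel-extended labels with a two-pointer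
-- maximal-run scanner (alternative decomposition, same O(n) cost).


-- ===== PORT A =====
-- A's for loop over the enumerated sentinel-extended list as structural recursion on the remaining
-- labels with the running index idx. The dict is kept as an association list in
-- insertion order; its keys (entity_start, idx) are pairwise distinct because
-- entity_start strictly increases, so dict assignment is exactly list append.
def aLoop (d : List (Int × Int × Int)) (prev : Int) (elab_ : Option Int)
    (estart : Option Nat) (idx : Nat) : List Int → List (Int × Int × Int)
  | [] => d
  | label :: rest =>
      if label ≠ prev then
        let d' := if prev ≠ 0 then
            d ++ [(((estart.getD 0 : Nat) : Int), (idx : Int), elab_.getD 0)] else d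
        aLoop d' label (some label) (some idx) (idx + 1) rest
      else
        aLoop d prev elab_ estart (idx + 1) rest

def get_entity_spans_to_label (labels : List Int) : List (Int × Int × Int) :=
  aLoop [] 0 none none 0 (labels ++ [0])

-- ===== PORT B =====
-- inner while loop: extend j while labels[j] == v
def spanEnd (labels : List Int) (v : Int) (n : Nat) (j : Nat) : Nat :=
  if h : j < n ∧ labels.getD j 0 = v then spanEnd labels v n (j + 1) else j
termination_by n - j
decreasing_by omega

theorem spanEnd_ge (labels : List Int) (v : Int) (n j : Nat) : j ≤ spanEnd labels v n j := by
  unfold spanEnd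
  split
  · exact le_trans (Nat.le_succ j) (spanEnd_ge labels v n (j + 1))
  · exact le_refl j
termination_by n - j
decreasing_by omega

-- outer while loop over i; the dict is again an insertion-ordered association list,
-- and its keys (i, j) are distinct since i strictly increases, so assignment = append.
def scanRuns (labels : List Int) (n : Nat) (acc : List (Int × Int × Int)) (i : Nat) :
    List (Int × Int × Int) :=
  if h : i < n then
    scanRuns labels n
      (if labels.getD i 0 ≠ 0 then
        acc ++ [((i : Int), ((spanEnd labels (labels.getD i 0) n (i + 1) : Nat) : Int),
                  labels.getD i 0)]
      else acc)
      (spanEnd labels (labels.getD i 0) n (i + 1))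
  else acc
termination_by n - i
decreasing_by have := spanEnd_ge labels (labels.getD i 0) n (i + 1); omega

def get_entity_spans_to_label_alt (labels : List Int) : List (Int × Int × Int) :=
  scanRuns labels labels.length [] 0

-- ===== PRECONDITION & SPEC =====
def Spec_get_entity_spans_to_label (labels : List Int) (out : List (Int × Int × Int)) : Prop := out = get_entity_spans_to_label_alt labels
instance (labels : List Int) (out : List (Int × Int × Int)) : Decidable (Spec_get_entity_spans_to_label labels out) := by unfold Spec_get_entity_spans_to_label; infer_instance

-- ===== CLAIM (what is proved, stated in full; the proofs are below) =====
def Claim_equal_get_entity_spans_to_label : Prop := ∀ (labels : List Int), Dom_get_entity_spans_to_label labels → Spec_get_entity_spans_to_label labels (get_entity_spans_to_label labels)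

-- ===== LEMMAS AND PROOFS =====

-- length of the maximal prefix of xs equal to v
def runLen (xs : List Int) (v : Int) : Nat := (xs.takeWhile (fun x => x == v)).length

-- common reference function: the list of nonzero maximal runs, starting at index i
def bRuns : List Int → Nat → List (Int × Int × Int)
  | [], _ => []
  | v :: ys, i =>
      (if v ≠ 0 then [((i : Int), ((i + 1 + runLen ys v : Nat) : Int), v)] else []) ++
        bRuns (ys.drop (runLen ys v)) (i + 1 + runLen ys v)
termination_by xs => xs.length
decreasing_by simp [runLen]

theorem runLen_nil (v : Int) : runLen [] v = 0 := rfl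

theorem runLen_cons_self (v : Int) (ys : List Int) : runLen (v :: ys) v = runLen ys v + 1 := by
  simp [runLen]

theorem runLen_cons_ne (w v : Int) (ys : List Int) (h : w ≠ v) : runLen (w :: ys) v = 0 := by
  simp [runLen, h]

theorem spanEnd_eq (labels : List Int) (v : Int) :
    ∀ j, spanEnd labels v labels.length j = j + runLen (labels.drop j) v := by
  intro j
  unfold spanEnd
  split
  case isTrue h =>
    obtain ⟨hj, hv⟩ := h
    rw [List.getD_eq_getElem labels 0 hj] at hv
    rw [spanEnd_eq labels v (j + 1), List.drop_eq_getElem_cons hj, hv, runLen_cons_self]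
    omega
  case isFalse h =>
    by_cases hj : j < labels.length
    · have hv : labels[j] ≠ v := by
        intro hc
        exact h ⟨hj, by rw [List.getD_eq_getElem labels 0 hj]; exact hc⟩
      rw [List.drop_eq_getElem_cons hj, runLen_cons_ne _ _ _ hv]
      omega
    · rw [List.drop_eq_nil_of_le (by omega), runLen_nil]
      omega
termination_by j => labels.length - j
decreasing_by omega

theorem spanEnd_le (labels : List Int) (v : Int) (n : Nat) :
    ∀ j, j ≤ n → spanEnd labels v n j ≤ n := by
  intro j hj
  unfold spanEnd
  split
  case isTrue h => exact spanEnd_le labels v n (j + 1) (by omega)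
  case isFalse h => exact hj
termination_by j => n - j
decreasing_by omega

theorem scanRuns_eq (labels : List Int) :
    ∀ i acc, i ≤ labels.length →
      scanRuns labels labels.length acc i = acc ++ bRuns (labels.drop i) i := by
  intro i acc hi
  unfold scanRuns
  split
  case isTrue h =>
    have hgd : labels.getD i 0 = labels[i] := List.getD_eq_getElem labels 0 h
    have hle : spanEnd labels (labels.getD i 0) labels.length (i + 1) ≤ labels.length :=
      spanEnd_le labels (labels.getD i 0) labels.length (i + 1) (by omega)
    rw [scanRuns_eq labels _ _ hle]
    rw [List.drop_eq_getElem_cons h, bRuns, hgd]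
    have hse : spanEnd labels labels[i] labels.length (i + 1)
        = i + 1 + runLen (labels.drop (i + 1)) labels[i] := spanEnd_eq labels labels[i] (i + 1)
    rw [hse, List.drop_drop]
    split <;> simp
  case isFalse h =>
    rw [List.drop_eq_nil_of_le (by omega), bRuns]
    simp
termination_by i => labels.length - i
decreasing_by
  have := spanEnd_ge labels (labels.getD i 0) labels.length (i + 1); omega

theorem aLoop_skip (d : List (Int × Int × Int)) (prev : Int) (elab_ : Option Int)
    (estart : Option Nat) :
    ∀ (k i : Nat) (t : List Int),
      aLoop d prev elab_ estart i (List.replicate k prev ++ t)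
        = aLoop d prev elab_ estart (i + k) t := by
  intro k
  induction k with
  | zero => intro i t; simp
  | succ m ih =>
    intro i t
    rw [List.replicate_succ, List.cons_append, aLoop,
      if_neg (show ¬ prev ≠ prev from fun hc => hc rfl)]
    have : i + (m + 1) = (i + 1) + m := by omega
    rw [this, ← ih (i + 1) t]

theorem aLoop_run (xs : List Int) :
    ∀ (v : Int) (s i : ℕ) (d : List (Int × Int × Int)),
      aLoop d v (some v) (some s) i (xs ++ [0])
        = d ++ (if v ≠ 0 then [((s : Int), ((i + runLen xs v : Nat) : Int), v)] else [])
            ++ bRuns (xs.drop (runLen xs v)) (i + runLen xs v) := by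
  induction xs with
  | nil =>
    intro v s i d
    by_cases hv : v = 0
    · subst hv
      rw [List.nil_append, aLoop, if_neg (show ¬ (0:Int) ≠ 0 from fun hc => hc rfl)]
      simp [aLoop, runLen_nil, bRuns]
    · rw [List.nil_append, aLoop, if_pos (show (0:Int) ≠ v from fun hc => hv hc.symm),
        if_pos hv]
      simp [aLoop, runLen_nil, bRuns, hv]
  | cons w ys ih =>
    intro v s i d
    by_cases hw : w = v
    · subst hw
      rw [List.cons_append, aLoop, if_neg (show ¬ w ≠ w from fun hc => hc rfl)]
      rw [ih w s (i + 1) d, runLen_cons_self]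
      have h1 : i + (runLen ys w + 1) = i + 1 + runLen ys w := by omega
      rw [h1, List.drop_succ_cons]
    · rw [List.cons_append, aLoop, if_pos hw]
      rw [ih w i (i + 1) _, runLen_cons_ne w v ys hw]
      simp only [List.drop_zero, Nat.add_zero, bRuns, List.append_assoc, Option.getD_some]
      split <;> simp

theorem runLen_replicate_append (k : Nat) (v : Int) (zs : List Int) :
    runLen (List.replicate k v ++ zs) v = k + runLen zs v := by
  induction k with
  | zero => simp
  | succ m ih =>
    rw [List.replicate_succ, List.cons_append, runLen_cons_self, ih]
    omega

theorem runLen_of_head_ne (zs : List Int) (v : Int)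
    (h : ∀ w ws, zs = w :: ws → w ≠ v) : runLen zs v = 0 := by
  cases zs with
  | nil => rfl
  | cons w ws => exact runLen_cons_ne w v ws (h w ws rfl)

theorem bRuns_replicate_zero (k : Nat) (zs : List Int) (i : Nat)
    (h : ∀ w ws, zs = w :: ws → w ≠ 0) :
    bRuns (List.replicate k 0 ++ zs) i = bRuns zs (i + k) := by
  cases k with
  | zero => simp
  | succ m =>
    rw [List.replicate_succ, List.cons_append, bRuns,
      if_neg (show ¬ (0:Int) ≠ 0 from fun hc => hc rfl)]
    rw [runLen_replicate_append, runLen_of_head_ne zs 0 h]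
    have hdrop : (List.replicate m (0 : Int) ++ zs).drop (m + 0) = zs := by
      have hdl := List.drop_left (l₁ := List.replicate m (0 : Int)) (l₂ := zs)
      rw [List.length_replicate] at hdl
      rw [Nat.add_zero]
      exact hdl
    rw [hdrop]
    have : i + 1 + (m + 0) = i + (m + 1) := by omega
    rw [this]
    simp

theorem aLoop_zero (xs : List Int) (i : Nat) (d : List (Int × Int × Int))
    (elab_ : Option Int) (estart : Option Nat) :
    aLoop d 0 elab_ estart i (xs ++ [0]) = d ++ bRuns xs i := by
  have hsplit : xs = List.replicate (runLen xs 0) 0 ++ xs.dropWhile (fun x => x == 0) := by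
    have ht : xs.takeWhile (fun x => x == 0) = List.replicate (runLen xs 0) 0 := by
      rw [List.eq_replicate_iff]
      exact ⟨rfl, fun b hb => by simpa using List.mem_takeWhile_imp hb⟩
    conv_lhs => rw [← List.takeWhile_append_dropWhile (p := fun x => x == 0) (l := xs)]
    rw [ht]
  have hhead : ∀ w ws, xs.dropWhile (fun x => x == 0) = w :: ws → w ≠ 0 := by
    intro w ws hw
    have := List.head?_dropWhile_not (fun x => x == 0) xs
    rw [hw] at this
    simpa using this
  conv_lhs => rw [hsplit]
  rw [List.append_assoc, aLoop_skip]
  conv_rhs => rw [hsplit]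
  rw [bRuns_replicate_zero _ _ _ hhead]
  cases hzs : xs.dropWhile (fun x => x == 0) with
  | nil =>
    rw [List.nil_append, aLoop, if_neg (show ¬ (0:Int) ≠ 0 from fun hc => hc rfl)]
    simp [aLoop, bRuns]
  | cons w ws =>
    have hw : w ≠ 0 := hhead w ws hzs
    rw [List.cons_append, aLoop, if_pos hw,
      if_neg (show ¬ (0:Int) ≠ 0 from fun hc => hc rfl)]
    rw [aLoop_run ws w (i + runLen xs 0) (i + runLen xs 0 + 1) d, bRuns, if_pos hw]
    simp only [List.append_assoc]

-- ===== VERDICT (by name: the statement is the Claim_ definition above) =====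
theorem get_entity_spans_to_label_spec : Claim_equal_get_entity_spans_to_label := by
  intro labels _
  unfold Spec_get_entity_spans_to_label
  unfold get_entity_spans_to_label get_entity_spans_to_label_alt
  rw [aLoop_zero, scanRuns_eq labels 0 [] (Nat.zero_le _)]
  simp
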